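-- pv_equiv track=rewrite | github.com/coffeeisafruit/jv-matcher | rich_match_service.py | _validate_timing
-- ===== SOURCE A (Python) =====
-- def _validate_timing(timing: str) -> str:
--     """Validate timing is one of the expected values"""
--     valid_timings = ["Immediate", "This Quarter", "Ongoing", "Long-term"]
--
--     if not timing or not isinstance(timing, str):
--         return "This Quarter"
--
--     # Case-insensitive match
--     timing_lower = timing.strip().lower()
--     for valid in valid_timings:
--         if valid.lower() == timing_lower:
--             return valid
--
--     # If contains key words, map to closest match
--     if "immediate" in timing_lower or "urgent" in timing_lower or "now" in timing_lower:
--         return "Immediate"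
--     elif "quarter" in timing_lower or "month" in timing_lower:
--         return "This Quarter"
--     elif "ongoing" in timing_lower or "continuous" in timing_lower:
--         return "Ongoing"
--     elif "long" in timing_lower or "future" in timing_lower:
--         return "Long-term"
--
--     return "This Quarter"
-- ===== SOURCE B (Python) =====
-- _TIMING_TABLE = [
--     (("immediate", "urgent", "now"), "Immediate"),
--     (("quarter", "month"), "This Quarter"),
--     (("ongoing", "continuous"), "Ongoing"),
--     (("long", "future"), "Long-term"),
-- ]
--
-- def _validate_timing(timing: str) -> str:
--     if not timing or not isinstance(timing, str):
--         return "This Quarter"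
--     timing_lower = timing.strip().lower()
--     for keywords, result in _TIMING_TABLE:
--         if any(k in timing_lower for k in keywords):
--             return result
--     return "This Quarter"
-- ===== Notes on version B (the rewrite author's own statement) =====
-- stated objective: simpler
-- what changed: Replaced the exact-match loop plus if/elif keyword chain by a single table-driven pass over (keywords, result) pairs; the exact-match loop is redundant because each canonical value contains its own keyword and no other group's.
import Mathlib
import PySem

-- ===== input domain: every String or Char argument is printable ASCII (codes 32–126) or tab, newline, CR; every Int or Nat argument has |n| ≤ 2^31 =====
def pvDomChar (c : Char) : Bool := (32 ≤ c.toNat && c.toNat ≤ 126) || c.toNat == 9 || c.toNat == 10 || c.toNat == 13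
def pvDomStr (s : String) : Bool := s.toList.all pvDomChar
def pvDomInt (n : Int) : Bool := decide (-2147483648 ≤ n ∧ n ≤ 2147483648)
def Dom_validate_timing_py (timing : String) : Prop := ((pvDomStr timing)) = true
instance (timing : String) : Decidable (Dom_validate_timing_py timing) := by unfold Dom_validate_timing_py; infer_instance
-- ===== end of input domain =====

-- B replaces A's exact-match loop + if/elif keyword chain by one table-driven pass (simpler; same cost).

-- ===== PORT A =====
-- body of A after the guard, on timing_lower = timing.strip().lower()
def pvACore (timing_lower : String) : String :=
  let valid_timings := ["Immediate", "This Quarter", "Ongoing", "Long-term"]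
  -- for valid in valid_timings: if valid.lower() == timing_lower: return valid
  match valid_timings.find? (fun v => PySem.Str.lower v == timing_lower) with
  | some v => v
  | none =>
      if PySem.Str.isIn "immediate" timing_lower || PySem.Str.isIn "urgent" timing_lower || PySem.Str.isIn "now" timing_lower then "Immediate"
      else if PySem.Str.isIn "quarter" timing_lower || PySem.Str.isIn "month" timing_lower then "This Quarter"
      else if PySem.Str.isIn "ongoing" timing_lower || PySem.Str.isIn "continuous" timing_lower then "Ongoing"
      else if PySem.Str.isIn "long" timing_lower || PySem.Str.isIn "future" timing_lower then "Long-term"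
      else "This Quarter"

def validate_timing_py (timing : String) : String :=
  if timing == "" then "This Quarter"
  else pvACore (PySem.Str.lower (PySem.Str.strip timing))

-- ===== PORT B =====
def pvTimingTable : List (List String × String) :=
  [(["immediate", "urgent", "now"], "Immediate"),
   (["quarter", "month"], "This Quarter"),
   (["ongoing", "continuous"], "Ongoing"),
   (["long", "future"], "Long-term")]

def pvTableLookup : List (List String × String) → String → String
  | [], _ => "This Quarter"
  | (kws, res) :: rest, t =>
      if kws.any (fun k => PySem.Str.isIn k t) then res else pvTableLookup rest t

def validate_timing_py_alt (timing : String) : String :=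
  if timing == "" then "This Quarter"
  else pvTableLookup pvTimingTable (PySem.Str.lower (PySem.Str.strip timing))

-- ===== PRECONDITION & SPEC =====
def Spec_validate_timing_py (timing : String) (out : String) : Prop := out = validate_timing_py_alt timing
instance (timing : String) (out : String) : Decidable (Spec_validate_timing_py timing out) := by unfold Spec_validate_timing_py; infer_instance

-- ===== CLAIM (what is proved, stated in full; the proofs are below) =====
def Claim_equal_validate_timing_py : Prop := ∀ (timing : String), Dom_validate_timing_py timing → Spec_validate_timing_py timing (validate_timing_py timing)

-- ===== LEMMAS AND PROOFS =====

-- core equality, for any normalized string t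
theorem pv_core_eq (t : String) : pvACore t = pvTableLookup pvTimingTable t := by
  have l1 : PySem.Str.lower "Immediate" = "immediate" := by decide
  have l2 : PySem.Str.lower "This Quarter" = "this quarter" := by decide
  have l3 : PySem.Str.lower "Ongoing" = "ongoing" := by decide
  have l4 : PySem.Str.lower "Long-term" = "long-term" := by decide
  by_cases h1 : t = "immediate"
  · subst h1; decide
  by_cases h2 : t = "this quarter"
  · subst h2; decide
  by_cases h3 : t = "ongoing"
  · subst h3; decide
  by_cases h4 : t = "long-term"
  · subst h4; decide
  have b1 : ("immediate" == t) = false := beq_eq_false_iff_ne.mpr (fun h => h1 h.symm)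
  have b2 : ("this quarter" == t) = false := beq_eq_false_iff_ne.mpr (fun h => h2 h.symm)
  have b3 : ("ongoing" == t) = false := beq_eq_false_iff_ne.mpr (fun h => h3 h.symm)
  have b4 : ("long-term" == t) = false := beq_eq_false_iff_ne.mpr (fun h => h4 h.symm)
  have f : ["Immediate", "This Quarter", "Ongoing", "Long-term"].find?
      (fun v => PySem.Str.lower v == t) = none := by
    simp [List.find?, l1, l2, l3, l4, b1, b2, b3, b4]
  unfold pvACore
  simp only []
  rw [show (["Immediate", "This Quarter", "Ongoing", "Long-term"] : List String) =
        ["Immediate", "This Quarter", "Ongoing", "Long-term"] from rfl, f]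
  simp [pvTableLookup, pvTimingTable, List.any, or_assoc]

-- ===== VERDICT (by name: the statement is the Claim_ definition above) =====
theorem validate_timing_py_spec : Claim_equal_validate_timing_py := by
  intro timing _
  unfold Spec_validate_timing_py validate_timing_py validate_timing_py_alt
  by_cases h : timing == ""
  · simp [h]
  · simp only [Bool.not_eq_true] at h
    rw [if_neg (by simp [h]), if_neg (by simp [h]), pv_core_eq]
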